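-- pv_equiv track=rewrite | github.com/primordial-creations/asguardian | Asgard/Freya/Visual/services/_image_ops_analysis.py | component_bounding_boxes
-- ===== SOURCE A (Python) =====
-- from typing import Dict, List, Tuple
--
-- def component_bounding_boxes(
--     labels: List[int], width: int, height: int, num_labels: int
-- ) -> Dict[int, Tuple[int, int, int, int, int]]:
--     """
--     For each component label, return (x_min, y_min, x_max, y_max, pixel_count).
--     """
--     boxes: Dict[int, List[int]] = {}
--     for y in range(height):
--         for x in range(width):
--             label = labels[y * width + x]
--             if label == 0:
--                 continue
--             if label not in boxes:
--                 boxes[label] = [x, y, x, y, 0]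
--             box = boxes[label]
--             if x < box[0]:
--                 box[0] = x
--             if y < box[1]:
--                 box[1] = y
--             if x > box[2]:
--                 box[2] = x
--             if y > box[3]:
--                 box[3] = y
--             box[4] += 1
--     return {k: (v[0], v[1], v[2], v[3], v[4]) for k, v in boxes.items()}
-- ===== SOURCE B (Python) =====
-- def component_bounding_boxes(labels, width, height, num_labels):
--     coords = {}
--     for y in range(height):
--         for x in range(width):
--             label = labels[y * width + x]
--             if label != 0:
--                 xs, ys = coords.setdefault(label, ([], []))
--                 xs.append(x)
--                 ys.append(y)
--     return {k: (min(xs), min(ys), max(xs), max(ys), len(xs))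
--             for k, (xs, ys) in coords.items()}
-- ===== Notes on version B (the rewrite author's own statement) =====
-- stated objective: alternative
-- what changed: B replaces A's online running min/max/count updates with a two-phase collect-then-reduce: one pass gathers each label's x and y coordinates into per-label lists, then each 5-tuple is computed as (min(xs), min(ys), max(xs), max(ys), len(xs)).
import Mathlib
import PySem

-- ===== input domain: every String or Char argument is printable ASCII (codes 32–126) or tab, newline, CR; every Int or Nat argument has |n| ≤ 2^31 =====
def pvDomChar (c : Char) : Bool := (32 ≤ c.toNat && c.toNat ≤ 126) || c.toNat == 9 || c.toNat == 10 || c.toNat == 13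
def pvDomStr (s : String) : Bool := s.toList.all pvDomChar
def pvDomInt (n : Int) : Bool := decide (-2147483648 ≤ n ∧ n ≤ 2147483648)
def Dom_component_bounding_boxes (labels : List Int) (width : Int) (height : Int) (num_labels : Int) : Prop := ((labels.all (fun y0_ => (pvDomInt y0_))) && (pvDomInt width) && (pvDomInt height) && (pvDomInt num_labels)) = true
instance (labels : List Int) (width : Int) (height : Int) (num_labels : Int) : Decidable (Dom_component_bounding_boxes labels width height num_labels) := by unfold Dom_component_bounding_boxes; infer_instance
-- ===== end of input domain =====

-- B replaces A's running min/max/count updates by collecting each label's x/y coordinates and reducing them with min/max/len at the end (objective: alternative decomposition).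

-- ===== PORT A =====
-- one iteration of A's inner loop body, for pixel (x, y)
def cbbStepA (labels : List Int) (width : Int)
    (da : PySem.Dict Int (Int × Int × Int × Int × Int)) (x y : Int) :
    PySem.Dict Int (Int × Int × Int × Int × Int) :=
  let label := (PySem.List.pyGet? labels (y * width + x)).getD 0
  if label = 0 then da else
    let d1 := if da.contains label then da else da.insert label (x, y, x, y, 0)
    let box := d1.getD label (0, 0, 0, 0, 0)
    let b0 := if x < box.1 then x else box.1
    let b1 := if y < box.2.1 then y else box.2.1
    let b2 := if x > box.2.2.1 then x else box.2.2.1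
    let b3 := if y > box.2.2.2.1 then y else box.2.2.2.1
    d1.insert label (b0, b1, b2, b3, box.2.2.2.2 + 1)

def component_bounding_boxes (labels : List Int) (width : Int) (height : Int) (num_labels : Int) : List (Int × Int × Int × Int × Int × Int) :=
  (((PySem.List.pyRange 0 height 1).foldl (fun d y =>
      (PySem.List.pyRange 0 width 1).foldl (fun d x => cbbStepA labels width d x y) d)
    PySem.Dict.empty).items).map (fun p => (p.1, p.2))

-- ===== PORT B =====
-- one iteration of B's inner loop body: collect the pixel's coordinates under its label
def cbbStepB (labels : List Int) (width : Int)
    (db : PySem.Dict Int (List Int × List Int)) (x y : Int) :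
    PySem.Dict Int (List Int × List Int) :=
  let label := (PySem.List.pyGet? labels (y * width + x)).getD 0
  if label = 0 then db else
    let p := db.getD label ([], [])
    db.insert label (p.1 ++ [x], p.2 ++ [y])

-- the final dict comprehension's value: (min(xs), min(ys), max(xs), max(ys), len(xs))
def cbbReduce (p : List Int × List Int) : Int × Int × Int × Int × Int :=
  ((PySem.List.min? p.1 (fun v => v)).getD 0,
   (PySem.List.min? p.2 (fun v => v)).getD 0,
   (PySem.List.max? p.1 (fun v => v)).getD 0,
   (PySem.List.max? p.2 (fun v => v)).getD 0,
   (p.1.length : Int))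

def component_bounding_boxes_alt (labels : List Int) (width : Int) (height : Int) (num_labels : Int) : List (Int × Int × Int × Int × Int × Int) :=
  (((PySem.List.pyRange 0 height 1).foldl (fun d y =>
      (PySem.List.pyRange 0 width 1).foldl (fun d x => cbbStepB labels width d x y) d)
    PySem.Dict.empty).items).map (fun q => (q.1, cbbReduce q.2))

-- ===== PRECONDITION & SPEC =====
-- Pre_ excludes exactly the inputs on which A raises IndexError: a positive grid whose labels list is shorter than width*height.
def Pre_component_bounding_boxes (labels : List Int) (width : Int) (height : Int) (num_labels : Int) : Prop :=
  0 < width → 0 < height → height * width ≤ (labels.length : Int)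
instance (labels : List Int) (width : Int) (height : Int) (num_labels : Int) : Decidable (Pre_component_bounding_boxes labels width height num_labels) := by unfold Pre_component_bounding_boxes; infer_instance

def pvWitness_component_bounding_boxes : List Int × Int × Int × Int := ([1, 2, 0, 1], 2, 2, 2)

def Spec_component_bounding_boxes (labels : List Int) (width : Int) (height : Int) (num_labels : Int) (out : List (Int × Int × Int × Int × Int × Int)) : Prop := out = component_bounding_boxes_alt labels width height num_labels
instance (labels : List Int) (width : Int) (height : Int) (num_labels : Int) (out : List (Int × Int × Int × Int × Int × Int)) : Decidable (Spec_component_bounding_boxes labels width height num_labels out) := by unfold Spec_component_bounding_boxes; infer_instance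

-- ===== CLAIM (what is proved, stated in full; the proofs are below) =====
def Claim_equal_component_bounding_boxes : Prop := ∀ (labels : List Int) (width : Int) (height : Int) (num_labels : Int), Dom_component_bounding_boxes labels width height num_labels → Pre_component_bounding_boxes labels width height num_labels → Spec_component_bounding_boxes labels width height num_labels (component_bounding_boxes labels width height num_labels)

-- ===== LEMMAS AND PROOFS =====

-- the simulation invariant between A's running-box dict and B's coordinate-list dict
def cbbInv (da : PySem.Dict Int (Int × Int × Int × Int × Int))
    (db : PySem.Dict Int (List Int × List Int)) : Prop :=
  da.items = db.items.map (fun q => (q.1, cbbReduce q.2)) ∧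
  db.keys.Nodup ∧
  ∀ q ∈ db.items, q.2.1 ≠ [] ∧ q.2.2 ≠ []

-- overwriting a key the dict does not contain rewrites nothing
theorem cbb_map_overwrite_id {ν : Type} (d : PySem.Dict Int ν) (k : Int) (v : ν)
    (h : d.contains k = false) :
    d.items.map (fun p => if (p.1 == k) = true then (k, v) else p) = d.items := by
  have hmem : ∀ p ∈ d.items, p.1 ≠ k := by
    intro p hp hpk
    have hk := PySem.Dict.mem_keys_of_mem_items d hp
    rw [hpk] at hk
    rw [← PySem.Dict.contains_iff_mem_keys] at hk
    rw [h] at hk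
    exact Bool.false_ne_true hk
  calc d.items.map (fun p => if (p.1 == k) = true then (k, v) else p)
      = d.items.map id := List.map_congr_left (fun p hp => by simp [hmem p hp])
    _ = d.items := List.map_id _

-- min over an appended element is A's running-min update
theorem cbb_min_app (xs : List Int) (x : Int) (h : xs ≠ []) :
    (PySem.List.min? (xs ++ [x]) (fun v => v)).getD 0 =
      (if x < (PySem.List.min? xs (fun v => v)).getD 0 then x
       else (PySem.List.min? xs (fun v => v)).getD 0) := by
  cases xs with
  | nil => exact absurd rfl h
  | cons a t =>
    rw [List.cons_append, PySem.List.min?_id_cons, PySem.List.min?_id_cons, List.foldl_append]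
    simp only [List.foldl, Option.getD_some]
    omega

-- max over an appended element is A's running-max update
theorem cbb_max_app (xs : List Int) (x : Int) (h : xs ≠ []) :
    (PySem.List.max? (xs ++ [x]) (fun v => v)).getD 0 =
      (if x > (PySem.List.max? xs (fun v => v)).getD 0 then x
       else (PySem.List.max? xs (fun v => v)).getD 0) := by
  cases xs with
  | nil => exact absurd rfl h
  | cons a t =>
    rw [List.cons_append, PySem.List.max?_id_cons, PySem.List.max?_id_cons, List.foldl_append]
    simp only [List.foldl, Option.getD_some]
    omega

theorem cbb_reduce_single (x y : Int) : cbbReduce ([x], [y]) = (x, y, x, y, 1) := by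
  simp [cbbReduce, PySem.List.min?_id_cons, PySem.List.max?_id_cons]

theorem cbbInv_step (labels : List Int) (width : Int)
    (da : PySem.Dict Int (Int × Int × Int × Int × Int))
    (db : PySem.Dict Int (List Int × List Int)) (x y : Int)
    (h : cbbInv da db) :
    cbbInv (cbbStepA labels width da x y) (cbbStepB labels width db x y) := by
  obtain ⟨hItems, hNodup, hNE⟩ := h
  set l := (PySem.List.pyGet? labels (y * width + x)).getD 0 with hl
  by_cases h0 : l = 0
  · have hA : cbbStepA labels width da x y = da := by simp [cbbStepA, ← hl, h0]
    have hB : cbbStepB labels width db x y = db := by simp [cbbStepB, ← hl, h0]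
    rw [hA, hB]; exact ⟨hItems, hNodup, hNE⟩
  have hkeys : da.keys = db.keys := by
    simp only [PySem.Dict.keys, hItems, List.map_map]
    exact List.map_congr_left (fun q _ => rfl)
  have hNodupA : da.keys.Nodup := by rw [hkeys]; exact hNodup
  have hcont : da.contains l = db.contains l := by
    rw [PySem.Dict.contains_eq_decide_mem_keys, PySem.Dict.contains_eq_decide_mem_keys, hkeys]
  by_cases hc : db.contains l = true
  · -- label already present: A folds the coordinates into the running box, B appends them
    have hcA : da.contains l = true := by rw [hcont]; exact hc
    obtain ⟨lp, hlp⟩ : ∃ p, (l, p) ∈ db.items := by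
      have hm := (PySem.Dict.contains_iff_mem_keys db l).mp hc
      simp only [PySem.Dict.keys, List.mem_map] at hm
      obtain ⟨q, hq, hq1⟩ := hm
      exact ⟨q.2, by rw [← hq1]; exact hq⟩
    have hgetB : db.getD l ([], []) = lp := PySem.Dict.getD_of_mem_items db hlp hNodup _
    have hmemA : (l, cbbReduce lp) ∈ da.items := by
      rw [hItems]; exact List.mem_map_of_mem hlp
    have hgetA : da.getD l (0, 0, 0, 0, 0) = cbbReduce lp :=
      PySem.Dict.getD_of_mem_items da hmemA hNodupA _
    have hA : cbbStepA labels width da x y =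
        da.insert l
          (if x < (cbbReduce lp).1 then x else (cbbReduce lp).1,
           if y < (cbbReduce lp).2.1 then y else (cbbReduce lp).2.1,
           if x > (cbbReduce lp).2.2.1 then x else (cbbReduce lp).2.2.1,
           if y > (cbbReduce lp).2.2.2.1 then y else (cbbReduce lp).2.2.2.1,
           (cbbReduce lp).2.2.2.2 + 1) := by
      simp [cbbStepA, ← hl, h0, hcA, hgetA]
    have hB : cbbStepB labels width db x y = db.insert l (lp.1 ++ [x], lp.2 ++ [y]) := by
      simp [cbbStepB, ← hl, h0, hgetB]
    refine ⟨?_, ?_, ?_⟩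
    · rw [hA, hB, PySem.Dict.items_insert_of_contains da _ hcA,
        PySem.Dict.items_insert_of_contains db _ hc, hItems, List.map_map, List.map_map]
      apply List.map_congr_left
      intro q hq
      by_cases hq1 : q.1 = l
      · have hq2 : q.2 = lp := by
          have hg : db.getD q.1 ([], []) = q.2 := PySem.Dict.getD_of_mem_items db hq hNodup _
          rw [hq1, hgetB] at hg
          exact hg.symm
        have hx : q.2.1 ≠ [] := (hNE q hq).1
        have hy : q.2.2 ≠ [] := (hNE q hq).2
        simp only [Function.comp, hq1, beq_self_eq_true, if_true, hq2]
        have e1 := cbb_min_app lp.1 x (hq2 ▸ hx)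
        have e2 := cbb_min_app lp.2 y (hq2 ▸ hy)
        have e3 := cbb_max_app lp.1 x (hq2 ▸ hx)
        have e4 := cbb_max_app lp.2 y (hq2 ▸ hy)
        simp only [cbbReduce] at e1 e2 e3 e4 ⊢
        rw [e1, e2, e3, e4]
        simp [List.length_append]
      · simp only [Function.comp]
        have hbeq : (q.1 == l) = false := by simp [hq1]
        simp [hbeq]
    · rw [hB]; exact PySem.Dict.nodup_keys_insert db l _ hNodup
    · rw [hB]
      intro q hq
      rw [PySem.Dict.mem_items_insert] at hq
      rcases hq with hq | ⟨hq, -⟩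
      · subst hq
        constructor <;> simp
      · exact hNE q hq
  · -- first sight of the label: both sides append a fresh entry
    have hc' : db.contains l = false := by
      cases hcv : db.contains l
      · rfl
      · exact absurd hcv hc
    have hcA' : da.contains l = false := by rw [hcont]; exact hc'
    have hA : cbbStepA labels width da x y =
        (da.insert l (x, y, x, y, 0)).insert l (x, y, x, y, 1) := by
      simp [cbbStepA, ← hl, h0, hcA', PySem.Dict.getD_insert_self]
    have hB : cbbStepB labels width db x y = db.insert l ([x], [y]) := by
      simp [cbbStepB, ← hl, h0, PySem.Dict.getD_of_not_contains db _ hc']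
    refine ⟨?_, ?_, ?_⟩
    · rw [hA, hB,
        PySem.Dict.items_insert_of_contains _ _ (PySem.Dict.contains_insert_self da l _),
        PySem.Dict.items_insert_of_not_contains da _ hcA',
        PySem.Dict.items_insert_of_not_contains db _ hc',
        List.map_append, cbb_map_overwrite_id da l _ hcA', List.map_append, hItems]
      simp [cbb_reduce_single]
    · rw [hB]; exact PySem.Dict.nodup_keys_insert db l _ hNodup
    · rw [hB]
      intro q hq
      rw [PySem.Dict.mem_items_insert] at hq
      rcases hq with hq | ⟨hq, -⟩
      · subst hq
        constructor <;> simp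
      · exact hNE q hq

theorem cbbInv_inner (labels : List Int) (width : Int) (y : Int) (xs : List Int)
    (da : PySem.Dict Int (Int × Int × Int × Int × Int))
    (db : PySem.Dict Int (List Int × List Int))
    (h : cbbInv da db) :
    cbbInv (xs.foldl (fun d x => cbbStepA labels width d x y) da)
           (xs.foldl (fun d x => cbbStepB labels width d x y) db) := by
  induction xs generalizing da db with
  | nil => exact h
  | cons a t ih => exact ih _ _ (cbbInv_step labels width da db a y h)

theorem cbbInv_loop (labels : List Int) (width : Int) (ys xs : List Int)
    (da : PySem.Dict Int (Int × Int × Int × Int × Int))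
    (db : PySem.Dict Int (List Int × List Int))
    (h : cbbInv da db) :
    cbbInv (ys.foldl (fun d y => xs.foldl (fun d x => cbbStepA labels width d x y) d) da)
           (ys.foldl (fun d y => xs.foldl (fun d x => cbbStepB labels width d x y) d) db) := by
  induction ys generalizing da db with
  | nil => exact h
  | cons b t ih => exact ih _ _ (cbbInv_inner labels width b xs da db h)

-- ===== VERDICT (by name: the statement is the Claim_ definition above) =====
theorem component_bounding_boxes_spec : Claim_equal_component_bounding_boxes := by
  intro labels width height num_labels _ _
  unfold Spec_component_bounding_boxes component_bounding_boxes component_bounding_boxes_alt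
  obtain ⟨h1, -, -⟩ :=
    cbbInv_loop labels width (PySem.List.pyRange 0 height 1) (PySem.List.pyRange 0 width 1)
      PySem.Dict.empty PySem.Dict.empty ⟨rfl, PySem.Dict.nodup_keys_empty, by intro q hq; simp [PySem.Dict.empty] at hq⟩
  rw [show (fun p : Int × (Int × Int × Int × Int × Int) => (p.1, p.2)) = id from funext fun p => rfl,
    List.map_id, h1]
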